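-- pv_equiv track=rewrite | github.com/Aleksandr-Mamonov/insulars | app/game.py | _max_coins_player
-- ===== SOURCE A (Python) =====
-- def _max_coins_player(players, currencies: list):
--     winner = None
--
--     max_coins = 0
--     for player in players.values():
--         total_sum = 0
--         for curr in currencies:
--             total_sum += player['purse'][curr]['amount'] if curr in player['purse'] else 0
--
--         if max_coins < total_sum:
--             winner = player
--             max_coins = total_sum
--         elif max_coins == total_sum:
--             winner = None
--
--     return winner
-- ===== SOURCE B (Python) =====
-- def _max_coins_player(players, currencies: list):
--     # compute-all-totals, then max + uniqueness reduction
--     totals = [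
--         (sum(p['purse'][c]['amount'] if c in p['purse'] else 0 for c in currencies), p)
--         for p in players.values()
--     ]
--     if not totals:
--         return None
--     m = max(t for t, _ in totals)
--     if m <= 0:
--         return None
--     winners = [p for t, p in totals if t == m]
--     return winners[0] if len(winners) == 1 else None
-- ===== Notes on version B (the rewrite author's own statement) =====
-- stated objective: alternative
-- what changed: Replaces A's single pass with a running max and tie-reset winner state by a two-phase decomposition: compute every player's total first, then reduce by max + uniqueness count (winner iff a strictly positive maximum is attained by exactly one player).
import Mathlib
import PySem

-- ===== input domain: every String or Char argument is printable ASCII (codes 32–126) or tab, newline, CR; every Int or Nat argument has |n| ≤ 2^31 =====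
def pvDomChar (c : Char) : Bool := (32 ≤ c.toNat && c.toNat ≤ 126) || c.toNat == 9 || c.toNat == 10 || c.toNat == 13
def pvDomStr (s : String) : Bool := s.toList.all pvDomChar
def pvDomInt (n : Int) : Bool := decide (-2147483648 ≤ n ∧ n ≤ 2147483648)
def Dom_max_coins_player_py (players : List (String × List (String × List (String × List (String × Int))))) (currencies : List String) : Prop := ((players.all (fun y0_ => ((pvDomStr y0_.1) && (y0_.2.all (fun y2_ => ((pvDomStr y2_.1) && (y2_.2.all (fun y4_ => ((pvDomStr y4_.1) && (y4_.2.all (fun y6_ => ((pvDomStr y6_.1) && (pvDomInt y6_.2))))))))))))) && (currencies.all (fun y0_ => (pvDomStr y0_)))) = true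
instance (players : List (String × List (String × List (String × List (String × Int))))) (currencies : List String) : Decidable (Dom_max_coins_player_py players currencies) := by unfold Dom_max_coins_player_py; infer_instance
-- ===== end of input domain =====

-- B replaces A's running-max-with-tie-reset single pass by computing all totals first,
-- then a max + uniqueness reduction (alternative decomposition, same cost).

-- ===== PORT A =====
-- the expression  player['purse'][curr]['amount'] if curr in player['purse'] else 0
-- (shared verbatim by both Pythons); the 'none' branches are Python KeyErrors, excluded by Pre_
def pvAmount (player : List (String × List (String × List (String × Int)))) (curr : String) : Int :=
  match (PySem.Dict.ofList player).get? "purse" with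
  | none => 0  -- KeyError in Python; outside Pre_
  | some purse =>
    if (PySem.Dict.ofList purse).contains curr then
      match (PySem.Dict.ofList purse).get? curr with
      | none => 0  -- unreachable (contains just checked)
      | some entry =>
        match (PySem.Dict.ofList entry).get? "amount" with
        | none => 0  -- KeyError in Python; outside Pre_
        | some a => a
    else 0

def max_coins_player_py (players : List (String × List (String × List (String × List (String × Int))))) (currencies : List String) : Option (List (String × List (String × List (String × Int)))) :=
  (((PySem.Dict.ofList players).values).foldl
    (fun st player =>
      let total_sum := currencies.foldl (fun t curr => t + pvAmount player curr) 0
      if st.2 < total_sum then (some player, total_sum)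
      else if st.2 == total_sum then (none, st.2)
      else st)
    ((none : Option (List (String × List (String × List (String × Int))))), (0 : Int))).1

-- ===== PORT B =====
def max_coins_player_py_alt (players : List (String × List (String × List (String × List (String × Int))))) (currencies : List String) : Option (List (String × List (String × List (String × Int)))) :=
  let totals := ((PySem.Dict.ofList players).values).map
    (fun p => ((currencies.map (fun c => pvAmount p c)).sum, p))
  if totals.isEmpty then none  -- 'if not totals: return None'
  else
    -- m = max(t for t, _ in totals); the .getD 0 branch is unreachable (totals nonempty)
    let m : Int := (PySem.List.max? (totals.map (fun q => q.1)) (fun (x : Int) => x)).getD 0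
    if m ≤ 0 then none
    else
      let winners := (totals.filter (fun q => q.1 == m)).map (fun q => q.2)
      if winners.length = 1 then PySem.List.pyGet? winners 0 else none

-- ===== PRECONDITION & SPEC =====
-- Pre_ excludes exactly the inputs where Python A raises KeyError: currencies nonempty and
-- some player lacks a 'purse' key, or some purse entry for a requested currency lacks 'amount'.
def pvPreB (players : List (String × List (String × List (String × List (String × Int))))) (currencies : List String) : Bool :=
  currencies.isEmpty ||
  ((PySem.Dict.ofList players).values).all (fun p =>
    match (PySem.Dict.ofList p).get? "purse" with
    | none => false
    | some purse => currencies.all (fun c =>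
        match (PySem.Dict.ofList purse).get? c with
        | none => true
        | some entry => (PySem.Dict.ofList entry).contains "amount"))

def Pre_max_coins_player_py (players : List (String × List (String × List (String × List (String × Int))))) (currencies : List String) : Prop :=
  pvPreB players currencies = true
instance (players : List (String × List (String × List (String × List (String × Int))))) (currencies : List String) : Decidable (Pre_max_coins_player_py players currencies) := by unfold Pre_max_coins_player_py; infer_instance

def pvWitness_max_coins_player_py : (List (String × List (String × List (String × List (String × Int))))) × List String :=
  ([("p1", [("purse", [("gold", [("amount", 3)])])]),
    ("p2", [("purse", [("gold", [("amount", 1)])])])], ["gold"])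

def Spec_max_coins_player_py (players : List (String × List (String × List (String × List (String × Int))))) (currencies : List String) (out : Option (List (String × List (String × List (String × Int))))) : Prop := out = max_coins_player_py_alt players currencies
instance (players : List (String × List (String × List (String × List (String × Int))))) (currencies : List String) (out : Option (List (String × List (String × List (String × Int))))) : Decidable (Spec_max_coins_player_py players currencies out) := by
  unfold Spec_max_coins_player_py
  haveI h1 : DecidableEq (List (String × List (String × Int))) := inferInstance
  haveI h2 : DecidableEq (List (String × List (String × List (String × Int)))) := inferInstance
  infer_instance

-- ===== CLAIM (what is proved, stated in full; the proofs are below) =====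
def Claim_equal_max_coins_player_py : Prop := ∀ (players : List (String × List (String × List (String × List (String × Int))))) (currencies : List String), Dom_max_coins_player_py players currencies → Pre_max_coins_player_py players currencies → Spec_max_coins_player_py players currencies (max_coins_player_py players currencies)

-- ===== LEMMAS AND PROOFS =====
-- helper names for the proof
def pvStep {α : Type} (st : Option α × Int) (q : Int × α) : Option α × Int :=
  if st.2 < q.1 then (some q.2, q.1)
  else if st.2 == q.1 then (none, st.2)
  else st

def pvMax {α : Type} (ts : List (Int × α)) : Int :=
  ts.foldl (fun m q => if m < q.1 then q.1 else m) 0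

def pvW {α : Type} (ts : List (Int × α)) : Option α :=
  if 0 < pvMax ts then
    match ts.filter (fun q => q.1 == pvMax ts) with
    | [q] => some q.2
    | _ => none
  else none

theorem pv_if_max (m x : Int) : (if m < x then x else m) = max m x := by
  rw [max_def]; split_ifs <;> omega

theorem pvMax_eq_foldl_max {α : Type} (ts : List (Int × α)) :
    pvMax ts = (ts.map (fun q => q.1)).foldl max 0 := by
  unfold pvMax
  rw [List.foldl_map]
  exact PySem.List.foldl_congr_mem _ _ _ _ (fun m q _ => pv_if_max m q.1)

theorem pvMax_append {α : Type} (ts : List (Int × α)) (q : Int × α) :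
    pvMax (ts ++ [q]) = max (pvMax ts) q.1 := by
  unfold pvMax
  rw [List.foldl_append]
  simp [pv_if_max]

theorem pvMax_nonneg {α : Type} (ts : List (Int × α)) : 0 ≤ pvMax ts := by
  rw [pvMax_eq_foldl_max]
  exact (PySem.List.le_foldl_max (ts.map (fun q => q.1)) 0).1

theorem pvMax_isMax {α : Type} (ts : List (Int × α)) : ∀ q ∈ ts, q.1 ≤ pvMax ts := by
  intro q hq
  rw [pvMax_eq_foldl_max]
  exact (PySem.List.le_foldl_max (ts.map (fun p => p.1)) 0).2 q.1 (List.mem_map_of_mem hq)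

theorem pvMax_attained {α : Type} (ts : List (Int × α)) (h : 0 < pvMax ts) :
    ∃ q ∈ ts, q.1 = pvMax ts := by
  have := PySem.List.foldl_max_mem (ts.map (fun q => q.1)) 0
  rw [pvMax_eq_foldl_max] at h ⊢
  rcases this with h0 | hmem
  · omega
  · rcases List.mem_map.1 hmem with ⟨q, hq, hq1⟩
    exact ⟨q, hq, hq1⟩

theorem pv_loop_spec {α : Type} (ts : List (Int × α)) :
    ts.foldl pvStep ((none : Option α), (0 : Int)) = (pvW ts, pvMax ts) := by
  induction ts using List.reverseRecOn with
  | nil => simp [pvW, pvMax]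
  | append_singleton ts q ih =>
    rw [List.foldl_append, ih]
    simp only [List.foldl_cons, List.foldl_nil]
    have hmax := pvMax_append ts q
    have hnn := pvMax_nonneg ts
    rcases lt_trichotomy (pvMax ts) q.1 with hlt | heq | hgt
    · -- new strict max: winner becomes q
      have hm : pvMax (ts ++ [q]) = q.1 := by rw [hmax]; omega
      have hfilter : (ts ++ [q]).filter (fun p => p.1 == pvMax (ts ++ [q])) = [q] := by
        rw [List.filter_append]
        have h1 : ts.filter (fun p => p.1 == pvMax (ts ++ [q])) = [] := by
          rw [List.filter_eq_nil_iff]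
          intro p hp
          have := pvMax_isMax ts p hp
          simp only [beq_iff_eq, hm]
          omega
        rw [h1]
        simp [hm]
      have hstep : pvStep (pvW ts, pvMax ts) q = (some q.2, q.1) := by
        simp [pvStep, hlt]
      rw [hstep]
      unfold pvW
      rw [hm] at hfilter
      rw [hm, hfilter]
      have h0 : 0 < q.1 := by omega
      simp [h0]
    · -- tie with the current max: winner resets to none
      have hm : pvMax (ts ++ [q]) = pvMax ts := by rw [hmax]; omega
      have hstep : pvStep (pvW ts, pvMax ts) q = (none, pvMax ts) := by
        simp [pvStep, heq]
      rw [hstep]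
      unfold pvW
      rw [hm]
      by_cases hpos : 0 < pvMax ts
      · rcases pvMax_attained ts hpos with ⟨p, hp, hp1⟩
        have hne : ts.filter (fun r => r.1 == pvMax ts) ≠ [] := by
          intro hnil
          have : p ∈ ts.filter (fun r => r.1 == pvMax ts) :=
            List.mem_filter.2 ⟨hp, by simp [hp1]⟩
          rw [hnil] at this
          exact List.not_mem_nil this
        obtain ⟨a, rest, hF⟩ : ∃ a rest, ts.filter (fun r => r.1 == pvMax ts) = a :: rest := by
          cases h : ts.filter (fun r => r.1 == pvMax ts) with
          | nil => exact absurd h hne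
          | cons a rest => exact ⟨a, rest, rfl⟩
        have hq : [q].filter (fun r => r.1 == pvMax ts) = [q] := by simp [← heq]
        rw [List.filter_append, hF, hq]
        simp only [hpos, if_pos]
        rcases rest with _ | ⟨b, rest'⟩ <;> simp
      · simp [hpos]
    · -- strictly smaller total: state unchanged
      have hm : pvMax (ts ++ [q]) = pvMax ts := by rw [hmax]; omega
      have hstep : pvStep (pvW ts, pvMax ts) q = (pvW ts, pvMax ts) := by
        have h1 : ¬ pvMax ts < q.1 := by omega
        have h2 : (pvMax ts == q.1) = false := by simp; omega
        simp [pvStep, h1, h2]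
      rw [hstep]
      unfold pvW
      rw [hm]
      have hq : [q].filter (fun r => r.1 == pvMax ts) = [] := by simp; omega
      rw [List.filter_append, hq, List.append_nil]

theorem pv_foldl_max_shift (rest : List Int) (a b : Int) :
    rest.foldl max (max a b) = max a (rest.foldl max b) := by
  induction rest generalizing b with
  | nil => simp
  | cons h t ih => simp only [List.foldl_cons, max_assoc, ih]

theorem pvB_spec {α : Type} (ts : List (Int × α)) :
    (if ts.isEmpty then none
     else
       if (PySem.List.max? (ts.map (fun q => q.1)) (fun x => x)).getD 0 ≤ 0 then none
       else
         if ((ts.filter (fun q => q.1 == (PySem.List.max? (ts.map (fun q => q.1)) (fun x => x)).getD 0)).map (fun q => q.2)).length = 1 then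
           PySem.List.pyGet? ((ts.filter (fun q => q.1 == (PySem.List.max? (ts.map (fun q => q.1)) (fun x => x)).getD 0)).map (fun q => q.2)) 0
         else none) = pvW ts := by
  cases ts with
  | nil => simp [pvW, pvMax]
  | cons a rest =>
    simp only [List.isEmpty_cons, List.map_cons, PySem.List.max?_id_cons, Option.getD_some,
      Bool.false_eq_true, if_false]
    set m := (rest.map (fun q => q.1)).foldl max a.1 with hm
    have hmZ : pvMax (a :: rest) = max 0 m := by
      rw [pvMax_eq_foldl_max]
      simp only [List.map_cons, List.foldl_cons]
      exact pv_foldl_max_shift _ 0 a.1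
    by_cases hle : m ≤ 0
    · have h0 : pvMax (a :: rest) = 0 := by rw [hmZ, max_eq_left hle]
      simp [hle, pvW, h0]
    · have hmm : pvMax (a :: rest) = m := by rw [hmZ]; exact max_eq_right (by omega)
      have hpos : 0 < pvMax (a :: rest) := by omega
      rw [if_neg hle]
      unfold pvW
      rw [if_pos hpos, hmm]
      rcases hF : (a :: rest).filter (fun q => q.1 == m) with _ | ⟨w, ws⟩
      · simp [hF]
      · rcases ws with _ | ⟨y, ys⟩
        · simp [hF, PySem.List.pyGet?, PySem.List.pyIdx?]
        · simp [hF]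

-- ===== VERDICT (by name: the statement is the Claim_ definition above) =====
theorem max_coins_player_py_spec : Claim_equal_max_coins_player_py := by
  intro players currencies _ _
  unfold Spec_max_coins_player_py
  have hsum : ∀ p : List (String × List (String × List (String × Int))),
      (currencies.map (fun c => pvAmount p c)).sum
        = currencies.foldl (fun t curr => t + pvAmount p curr) 0 := by
    intro p
    rw [PySem.List.foldl_add currencies (fun c => pvAmount p c) 0, zero_add]
  have hA : max_coins_player_py players currencies
      = ((((PySem.Dict.ofList players).values).map
            (fun p => ((currencies.map (fun c => pvAmount p c)).sum, p))).foldl pvStep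
          ((none : Option (List (String × List (String × List (String × Int))))), (0 : Int))).1 := by
    unfold max_coins_player_py
    rw [List.foldl_map]
    congr 1
    refine PySem.List.foldl_congr_mem _ _ _ _ (fun st p _ => ?_)
    simp only [pvStep, hsum p]
  have hB : max_coins_player_py_alt players currencies
      = pvW (((PySem.Dict.ofList players).values).map
          (fun p => ((currencies.map (fun c => pvAmount p c)).sum, p))) := by
    simp only [max_coins_player_py_alt]
    exact pvB_spec _
  rw [hA, hB, pv_loop_spec]
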